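-- pv_equiv track=rewrite | github.com/jackBryanLambert/ReadyGB | main.py | googlePrep
-- ===== SOURCE A (Python) =====
-- def specChar(string):
--     """
--     @     #     $   %   ^   &   +
--     %40   %23   %24 %25 %5E %26 %2B
--     `   =   {   }   |   [   ]   \   :   ;   '   ?   ,   /
--     %60 %3D %7B %7D %7C %5B %5D %5C %3A %3B %27 %3F %2C %2F
--     """
--     string = string.replace("%", "%25")
--     string = string.replace("@", "%40")
--     string = string.replace("#", "%23")
--     string = string.replace("$", "%24")
--     string = string.replace("^", "%5E")
--     string = string.replace("&", "%26")
--     string = string.replace("+", "%2B")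
--     string = string.replace("`", "%60")
--     string = string.replace("=", "%3D")
--     string = string.replace("{", "%7B")
--     string = string.replace("}", "%7D")
--     string = string.replace("\\", "%5C")
--     string = string.replace(":", "%3A")
--     string = string.replace(";", "%3B")
--     string = string.replace("'", "%27")
--     string = string.replace("?", "%3F")
--     string = string.replace(",", "%2C")
--     string = string.replace("/", "%2F")
--
--     return string
--
-- def googlePrep(titleList, specTerm):
--     prefix = "https://www.google.com/search?q="
--     readyList = []
--     for i in titleList:
--         i = specChar(i)
--         i = i.replace(" ", "+")
--         i = prefix + i + specTerm + "&"
--         readyList.append(i)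
--
--     return readyList
-- ===== SOURCE B (Python) =====
-- _TABLE = {
--     " ": "+",
--     "%": "%25", "@": "%40", "#": "%23", "$": "%24", "^": "%5E",
--     "&": "%26", "+": "%2B", "`": "%60", "=": "%3D", "{": "%7B",
--     "}": "%7D", "\\": "%5C", ":": "%3A", ";": "%3B", "'": "%27",
--     "?": "%3F", ",": "%2C", "/": "%2F",
-- }
--
-- def googlePrep(titleList, specTerm):
--     prefix = "https://www.google.com/search?q="
--     return [prefix + "".join(_TABLE.get(c, c) for c in title) + specTerm + "&"
--             for title in titleList]
-- ===== Notes on version B (the rewrite author's own statement) =====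
-- stated objective: idiomatic
-- what changed: B builds one escape table (dict, space included) and makes a single pass over each title, looking each character up, instead of A's 18 sequential full-string .replace scans plus a 19th scan for spaces.
import Mathlib
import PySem

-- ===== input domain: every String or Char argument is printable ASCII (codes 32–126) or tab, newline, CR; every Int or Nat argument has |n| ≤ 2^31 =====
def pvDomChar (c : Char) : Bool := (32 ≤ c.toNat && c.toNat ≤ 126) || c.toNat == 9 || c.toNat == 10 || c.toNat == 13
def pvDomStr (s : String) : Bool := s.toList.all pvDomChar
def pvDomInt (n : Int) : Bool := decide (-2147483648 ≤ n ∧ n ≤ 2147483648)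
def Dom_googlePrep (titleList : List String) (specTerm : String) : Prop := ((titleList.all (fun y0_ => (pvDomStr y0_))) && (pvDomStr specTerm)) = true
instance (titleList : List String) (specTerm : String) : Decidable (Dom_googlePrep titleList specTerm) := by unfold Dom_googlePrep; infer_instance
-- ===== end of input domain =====

-- B replaces A's chain of 18 full-string .replace scans by one escape table and a single
-- pass over each title (objective: idiomatic single-pass translation); return value proved equal.

-- ===== PORT A =====
def specChar (string : String) : String :=
  let string := PySem.Str.replace string "%" "%25"
  let string := PySem.Str.replace string "@" "%40"
  let string := PySem.Str.replace string "#" "%23"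
  let string := PySem.Str.replace string "$" "%24"
  let string := PySem.Str.replace string "^" "%5E"
  let string := PySem.Str.replace string "&" "%26"
  let string := PySem.Str.replace string "+" "%2B"
  let string := PySem.Str.replace string "`" "%60"
  let string := PySem.Str.replace string "=" "%3D"
  let string := PySem.Str.replace string "{" "%7B"
  let string := PySem.Str.replace string "}" "%7D"
  let string := PySem.Str.replace string "\\" "%5C"
  let string := PySem.Str.replace string ":" "%3A"
  let string := PySem.Str.replace string ";" "%3B"
  let string := PySem.Str.replace string "'" "%27"
  let string := PySem.Str.replace string "?" "%3F"
  let string := PySem.Str.replace string "," "%2C"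
  let string := PySem.Str.replace string "/" "%2F"
  string

def googlePrep (titleList : List String) (specTerm : String) : List String :=
  let urlPrefix := "https://www.google.com/search?q="
  let readyList : List String := []
  titleList.foldl (fun readyList i =>
    let i := specChar i
    let i := PySem.Str.replace i " " "+"
    let i := urlPrefix ++ i ++ specTerm ++ "&"
    readyList ++ [i]) readyList

-- ===== PORT B =====
-- the escape table of Source B (space → '+' included: B escapes and joins in one pass)
def pvTable : PySem.Dict Char String :=
  PySem.Dict.ofList [(' ', "+"), ('%', "%25"), ('@', "%40"), ('#', "%23"), ('$', "%24"), ('^', "%5E"), ('&', "%26"), ('+', "%2B"), ('`', "%60"), ('=', "%3D"), ('{', "%7B"), ('}', "%7D"), ('\\', "%5C"), (':', "%3A"), (';', "%3B"), ('\'', "%27"), ('?', "%3F"), (',', "%2C"), ('/', "%2F")]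

def googlePrep_alt (titleList : List String) (specTerm : String) : List String :=
  let urlPrefix := "https://www.google.com/search?q="
  titleList.map (fun title =>
    urlPrefix ++ PySem.Str.join "" (title.toList.map (fun c => pvTable.getD c (String.ofList [c]))) ++ specTerm ++ "&")

-- ===== PRECONDITION & SPEC =====
def Spec_googlePrep (titleList : List String) (specTerm : String) (out : List String) : Prop := out = googlePrep_alt titleList specTerm
instance (titleList : List String) (specTerm : String) (out : List String) : Decidable (Spec_googlePrep titleList specTerm out) := by unfold Spec_googlePrep; infer_instance

-- ===== CLAIM (what is proved, stated in full; the proofs are below) =====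
def Claim_equal_googlePrep : Prop := ∀ (titleList : List String) (specTerm : String), Dom_googlePrep titleList specTerm → Spec_googlePrep titleList specTerm (googlePrep titleList specTerm)

-- ===== LEMMAS AND PROOFS =====

-- A's per-title transformation (specChar then space→'+'), stated on `List Char` (proof helper)
def escA (s : List Char) : List Char :=
  let s := PySem.Chars.replace s ['%'] ['%', '2', '5']
  let s := PySem.Chars.replace s ['@'] ['%', '4', '0']
  let s := PySem.Chars.replace s ['#'] ['%', '2', '3']
  let s := PySem.Chars.replace s ['$'] ['%', '2', '4']
  let s := PySem.Chars.replace s ['^'] ['%', '5', 'E']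
  let s := PySem.Chars.replace s ['&'] ['%', '2', '6']
  let s := PySem.Chars.replace s ['+'] ['%', '2', 'B']
  let s := PySem.Chars.replace s ['`'] ['%', '6', '0']
  let s := PySem.Chars.replace s ['='] ['%', '3', 'D']
  let s := PySem.Chars.replace s ['{'] ['%', '7', 'B']
  let s := PySem.Chars.replace s ['}'] ['%', '7', 'D']
  let s := PySem.Chars.replace s ['\\'] ['%', '5', 'C']
  let s := PySem.Chars.replace s [':'] ['%', '3', 'A']
  let s := PySem.Chars.replace s [';'] ['%', '3', 'B']
  let s := PySem.Chars.replace s ['\''] ['%', '2', '7']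
  let s := PySem.Chars.replace s ['?'] ['%', '3', 'F']
  let s := PySem.Chars.replace s [','] ['%', '2', 'C']
  let s := PySem.Chars.replace s ['/'] ['%', '2', 'F']
  let s := PySem.Chars.replace s [' '] ['+']
  s

theorem go_single (a : Char) (new : List Char) :
    ∀ (fuel : Nat) (l acc : List Char), l.length ≤ fuel →
      PySem.Chars.replace.go [a] new fuel l acc
        = acc.reverse ++ l.flatMap (fun c => if c = a then new else [c]) := by
  intro fuel
  induction fuel with
  | zero =>
    intro l acc h
    have : l = [] := List.eq_nil_of_length_eq_zero (Nat.le_zero.mp h)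
    subst this
    simp [PySem.Chars.replace.go]
  | succ n ih =>
    intro l acc h
    cases l with
    | nil => simp [PySem.Chars.replace.go]
    | cons c t =>
      simp only [PySem.Chars.replace.go]
      by_cases hc : c = a
      · subst hc
        simp only [List.isPrefixOf, beq_self_eq_true, Bool.true_and, if_true]
        rw [ih]
        · simp
        · simpa using Nat.le_of_succ_le_succ h
      · have hp : [a].isPrefixOf (c :: t) = false := by
          simp [List.isPrefixOf, Ne.symm hc]
        rw [hp]
        simp only [Bool.false_eq_true, if_false]
        rw [ih t (c :: acc) (by simpa using Nat.le_of_succ_le_succ h)]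
        simp [hc]

-- a single-character .replace is a character-wise substitution
theorem replace_single (s : List Char) (a : Char) (new : List Char) :
    PySem.Chars.replace s [a] new = s.flatMap (fun c => if c = a then new else [c]) := by
  rw [PySem.Chars.replace]
  simp [go_single a new s.length s [] (le_refl _)]

theorem pvTable_items :
    pvTable.items = [(' ', "+"), ('%', "%25"), ('@', "%40"), ('#', "%23"), ('$', "%24"), ('^', "%5E"), ('&', "%26"), ('+', "%2B"), ('`', "%60"), ('=', "%3D"), ('{', "%7B"), ('}', "%7D"), ('\\', "%5C"), (':', "%3A"), (';', "%3B"), ('\'', "%27"), ('?', "%3F"), (',', "%2C"), ('/', "%2F")] := by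
  decide

-- A's replace chain agrees character-wise with B's table lookup
set_option maxHeartbeats 2000000 in
theorem escA_eq (s : List Char) :
    escA s = s.flatMap (fun c => (pvTable.getD c (String.ofList [c])).toList) := by
  unfold escA
  simp only [replace_single, List.flatMap_assoc]
  apply List.flatMap_congr
  intro c _
  by_cases h0 : c = ' '
  · subst h0; decide
  by_cases h1 : c = '%'
  · subst h1; decide
  by_cases h2 : c = '@'
  · subst h2; decide
  by_cases h3 : c = '#'
  · subst h3; decide
  by_cases h4 : c = '$'
  · subst h4; decide
  by_cases h5 : c = '^'
  · subst h5; decide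
  by_cases h6 : c = '&'
  · subst h6; decide
  by_cases h7 : c = '+'
  · subst h7; decide
  by_cases h8 : c = '`'
  · subst h8; decide
  by_cases h9 : c = '='
  · subst h9; decide
  by_cases h10 : c = '{'
  · subst h10; decide
  by_cases h11 : c = '}'
  · subst h11; decide
  by_cases h12 : c = '\\'
  · subst h12; decide
  by_cases h13 : c = ':'
  · subst h13; decide
  by_cases h14 : c = ';'
  · subst h14; decide
  by_cases h15 : c = '\''
  · subst h15; decide
  by_cases h16 : c = '?'
  · subst h16; decide
  by_cases h17 : c = ','
  · subst h17; decide
  by_cases h18 : c = '/'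
  · subst h18; decide
  have e0 : (' ' == c) = false := by simp [Ne.symm h0]
  have e1 : ('%' == c) = false := by simp [Ne.symm h1]
  have e2 : ('@' == c) = false := by simp [Ne.symm h2]
  have e3 : ('#' == c) = false := by simp [Ne.symm h3]
  have e4 : ('$' == c) = false := by simp [Ne.symm h4]
  have e5 : ('^' == c) = false := by simp [Ne.symm h5]
  have e6 : ('&' == c) = false := by simp [Ne.symm h6]
  have e7 : ('+' == c) = false := by simp [Ne.symm h7]
  have e8 : ('`' == c) = false := by simp [Ne.symm h8]
  have e9 : ('=' == c) = false := by simp [Ne.symm h9]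
  have e10 : ('{' == c) = false := by simp [Ne.symm h10]
  have e11 : ('}' == c) = false := by simp [Ne.symm h11]
  have e12 : ('\\' == c) = false := by simp [Ne.symm h12]
  have e13 : (':' == c) = false := by simp [Ne.symm h13]
  have e14 : (';' == c) = false := by simp [Ne.symm h14]
  have e15 : ('\'' == c) = false := by simp [Ne.symm h15]
  have e16 : ('?' == c) = false := by simp [Ne.symm h16]
  have e17 : (',' == c) = false := by simp [Ne.symm h17]
  have e18 : ('/' == c) = false := by simp [Ne.symm h18]
  simp [PySem.Dict.getD, PySem.Dict.get?, pvTable_items, List.find?,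
    h0, h1, h2, h3, h4, h5, h6, h7, h8, h9, h10, h11, h12, h13, h14, h15, h16, h17, h18, e0, e1, e2, e3, e4, e5, e6, e7, e8, e9, e10, e11, e12, e13, e14, e15, e16, e17, e18]

theorem specChar_toList (s : String) :
    (PySem.Str.replace (specChar s) " " "+").toList = escA s.toList := by
  simp [specChar, escA, PySem.Str.toList_replace]

-- "".join is flatten
theorem join_empty_sep (ps : List (List Char)) : PySem.Chars.join [] ps = ps.flatten := by
  induction ps with
  | nil => rfl
  | cons p t ih =>
    cases t with
    | nil => simp [PySem.Chars.join, List.intercalate, List.intersperse]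
    | cons q u => simp_all [PySem.Chars.join, List.intercalate, List.intersperse]

theorem join_map_eq (t : String) :
    (PySem.Str.join "" (t.toList.map (fun c => pvTable.getD c (String.ofList [c])))).toList
      = t.toList.flatMap (fun c => (pvTable.getD c (String.ofList [c])).toList) := by
  simp [PySem.Str.toList_join, join_empty_sep, List.flatMap_def, Function.comp_def]

-- ===== VERDICT (by name: the statement is the Claim_ definition above) =====
theorem googlePrep_spec : Claim_equal_googlePrep := by
  intro titleList specTerm _
  unfold Spec_googlePrep googlePrep googlePrep_alt
  rw [PySem.List.foldl_append_singleton_eq_map]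
  simp only [List.nil_append]
  apply List.map_congr_left
  intro t _
  have hmid : PySem.Str.replace (specChar t) " " "+"
      = PySem.Str.join "" (t.toList.map (fun c => pvTable.getD c (String.ofList [c]))) := by
    apply String.toList_inj.mp
    rw [specChar_toList, join_map_eq, escA_eq]
  rw [hmid]
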